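-- pv_equiv track=rewrite | github.com/ailleen1004/Algorithm_Study | 프로그래머스/unrated/135808. 과일 장수/과일 장수.py | solution
-- ===== SOURCE A (Python) =====
-- def solution(k, m, score):
--     result = 0
--     score.sort(reverse=True)
--     count = len(score)
--     if count<m:
--         return 0
--     while(count>=m):
--         answer = []
--         for i in range(m):
--             answer.append(score[len(score)-count+i])
--         result += min(answer)*m
--         count -= m
--     return result
-- ===== SOURCE B (Python) =====
-- def solution(k, m, score):
--     # Run-length approach: count occurrences of each score value, walk the
--     # distinct values in descending order, and count the group boundaries
--     # (positions p with p % m == m-1, within full groups) that fall inside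
--     # each value's run purely arithmetically.  Note: does not mutate score.
--     counts = {}
--     for v in score:
--         counts[v] = counts.get(v, 0) + 1
--     full = (len(score) // m) * m
--     result = 0
--     pos = 0
--     for v in sorted(counts, reverse=True):
--         hi = min(pos + counts[v], full)
--         if pos < hi:
--             result += v * (hi // m - pos // m) * m
--         pos += counts[v]
--     return result
-- ===== Notes on version B (the rewrite author's own statement) =====
-- stated objective: alternative
-- what changed: B never builds or scans the size-m groups: it counts occurrences of each score value in a dict, walks only the distinct values in descending order, and computes arithmetically (via floor divisions) how many group boundaries fall inside each value's run, instead of A's sort-then-nested-loop over every group with min(); B also does not mutate score, while A sorts it in place.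
import Mathlib
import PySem

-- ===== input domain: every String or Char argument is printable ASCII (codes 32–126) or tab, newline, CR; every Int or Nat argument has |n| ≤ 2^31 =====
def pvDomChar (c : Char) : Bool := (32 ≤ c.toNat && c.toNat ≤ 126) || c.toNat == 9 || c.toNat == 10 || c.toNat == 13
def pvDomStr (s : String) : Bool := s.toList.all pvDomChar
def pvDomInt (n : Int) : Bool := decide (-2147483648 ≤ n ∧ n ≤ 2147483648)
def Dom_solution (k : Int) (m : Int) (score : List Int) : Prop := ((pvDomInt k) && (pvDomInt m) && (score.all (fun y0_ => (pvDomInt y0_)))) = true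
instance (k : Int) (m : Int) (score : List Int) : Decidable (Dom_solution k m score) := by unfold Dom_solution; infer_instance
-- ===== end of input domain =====

-- B replaces A's sort-and-scan-groups by a value-counting (run-length) pass: count each
-- score value, walk the distinct values in descending order, and count the group
-- boundaries falling inside each value's run arithmetically; alternative algorithm.
-- A sorts `score` in place; B does not mutate it — the equivalence is about the return value.

-- ===== PORT A =====
-- while(count>=m): build answer = [score[len-count+i] for i in range(m)]; result += min(answer)*m; count -= m
-- (the '1 ≤ m' conjunct only makes the recursion total; Python raises ValueError before looping when m ≤ 0)
def pvALoop (s : List Int) (m : Int) (count : Int) (result : Int) : Int :=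
  if h : m ≤ count ∧ 1 ≤ m then
    let answer := (PySem.List.pyRange 0 m 1).map
      (fun i => (PySem.List.pyGet? s ((s.length : Int) - count + i)).getD 0)
    pvALoop s m (count - m) (result + ((PySem.List.min? answer (fun x => x)).getD 0) * m)
  else result
termination_by count.toNat
decreasing_by omega

def solution (k : Int) (m : Int) (score : List Int) : Int :=
  let s := PySem.List.sorted score (fun x => x) true
  let count : Int := s.length
  if count < m then 0
  else pvALoop s m count 0

-- ===== PORT B =====
-- counts[v] = counts.get(v,0)+1 for v in score; full = (len(score)//m)*m;
-- for v in sorted(counts, reverse=True): hi = min(pos+counts[v], full);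
--   if pos < hi: result += v*(hi//m - pos//m)*m;  pos += counts[v]
def solution_alt (k : Int) (m : Int) (score : List Int) : Int :=
  let counts := score.foldl (fun d v => d.insert v (d.getD v 0 + 1)) PySem.Dict.empty
  let full : Int := PySem.Int.floordiv (score.length : Int) m * m
  let st := (PySem.List.sorted counts.keys (fun x => x) true).foldl
    (fun (st : Int × Int) v =>
      let c := counts.getD v 0
      let hi := min (st.2 + c) full
      let r := if st.2 < hi then
          st.1 + v * (PySem.Int.floordiv hi m - PySem.Int.floordiv st.2 m) * m
        else st.1
      (r, st.2 + c)) ((0 : Int), (0 : Int))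
  st.1

-- ===== PRECONDITION & SPEC =====
-- Pre_ excludes m ≤ 0, on which the Python A raises ValueError (min() of the empty group).
def Pre_solution (k : Int) (m : Int) (score : List Int) : Prop := 1 ≤ m
instance (k : Int) (m : Int) (score : List Int) : Decidable (Pre_solution k m score) := by unfold Pre_solution; infer_instance
def pvWitness_solution : Int × Int × List Int := (0, 2, [1, 4, 2, 5, 3])
def Spec_solution (k : Int) (m : Int) (score : List Int) (out : Int) : Prop := out = solution_alt k m score
instance (k : Int) (m : Int) (score : List Int) (out : Int) : Decidable (Spec_solution k m score out) := by unfold Spec_solution; infer_instance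

-- ===== CLAIM (what is proved, stated in full; the proofs are below) =====
def Claim_equal_solution : Prop := ∀ (k : Int) (m : Int) (score : List Int), Dom_solution k m score → Pre_solution k m score → Spec_solution k m score (solution k m score)

-- ===== LEMMAS AND PROOFS =====

-- pvBS s M j = Σ_{j ≤ i < |s|, M ∣ i+1} s[i]*M : the common characterisation both ports are reduced to
def pvBS (s : List Int) (M : Nat) (j : Nat) : Int :=
  if h : j < s.length then
    (if (j + 1) % M = 0 then s[j] * M else 0) + pvBS s M (j + 1)
  else 0
termination_by s.length - j

theorem pvBS_stop (s : List Int) (M j : Nat) (h : s.length ≤ j) : pvBS s M j = 0 := by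
  rw [pvBS, dif_neg (by omega)]

theorem pvBS_skip (s : List Int) (M : Nat) :
    ∀ d j, (∀ t, t < d → (j + t + 1) % M ≠ 0) → pvBS s M j = pvBS s M (j + d) := by
  intro d
  induction d with
  | zero => intro j _; rfl
  | succ d ih =>
    intro j hmod
    by_cases hj : j < s.length
    · rw [pvBS, dif_pos hj, if_neg (by simpa using hmod 0 (by omega))]
      rw [zero_add, ih (j + 1) (fun t ht => by
        have := hmod (t + 1) (by omega); simpa [Nat.add_assoc, Nat.add_comm, Nat.add_left_comm] using this)]
      congr 1
      omega
    · rw [pvBS_stop s M j (by omega), pvBS_stop s M (j + (d + 1)) (by omega)]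

-- ---- A side: group-min machinery (answer list = a slice; min of a descending slice = its last element) ----
theorem pv_map_range_get (s : List Int) (st b : Nat) (h : st + b ≤ s.length) :
    (List.range b).map (fun j => (PySem.List.pyGet? s ((st : Int) + (j : Nat))).getD 0)
      = (s.drop st).take b := by
  apply List.ext_getElem
  · simp; omega
  · intro j h1 h2
    simp only [List.length_map, List.length_range] at h1
    have hj : st + j < s.length := by omega
    simp only [List.getElem_map, List.getElem_range, List.getElem_take, List.getElem_drop]
    have hcast : ((st : Int) + (j : Nat)) = ((st + j : Nat) : Int) := by push_cast; ring
    rw [hcast, PySem.List.pyGet?_natCast, List.getElem?_eq_getElem hj]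
    rfl

theorem pv_answer_eq (s : List Int) (st b : Nat) (h : st + b ≤ s.length) :
    (PySem.List.pyRange 0 (b : Int) 1).map
        (fun i => (PySem.List.pyGet? s ((st : Int) + i)).getD 0)
      = (s.drop st).take b := by
  rw [PySem.List.pyRange_one]
  simp only [sub_zero, Int.toNat_natCast, List.map_map, Function.comp_def, zero_add]
  exact pv_map_range_get s st b h

theorem pv_foldl_min_desc (t : List Int) (x : Int)
    (h : (x :: t).Pairwise (fun a b => b ≤ a)) :
    t.foldl min x = (x :: t).getLast (List.cons_ne_nil x t) := by
  induction t generalizing x with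
  | nil => simp
  | cons y t ih =>
    rcases List.pairwise_cons.mp h with ⟨hx, h2⟩
    have hyx : y ≤ x := hx y (by simp)
    rw [List.getLast_cons (List.cons_ne_nil y t)]
    simp only [List.foldl_cons, min_eq_right hyx]
    exact ih y h2

theorem pv_min_desc (l : List Int) (hne : l ≠ [])
    (h : l.Pairwise (fun a b => b ≤ a)) :
    PySem.List.min? l (fun x => x) = some (l.getLast hne) := by
  obtain ⟨x, t, rfl⟩ := List.exists_cons_of_ne_nil hne
  rw [PySem.List.min?_id_cons, pv_foldl_min_desc t x h]

theorem pv_group_min (s : List Int) (hs : s.Pairwise (fun a b => b ≤ a))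
    (st b : Nat) (hb : 1 ≤ b) (h : st + b ≤ s.length) :
    (PySem.List.min? ((s.drop st).take b) (fun x => x)).getD 0
      = s[st + b - 1]'(by omega) := by
  have hlen : ((s.drop st).take b).length = b := by simp; omega
  have hne : (s.drop st).take b ≠ [] := by
    intro hcontra; rw [hcontra] at hlen; simp at hlen; omega
  have hsub : ((s.drop st).take b).Sublist s :=
    (List.take_sublist _ _).trans (List.drop_sublist _ _)
  rw [pv_min_desc _ hne (hs.sublist hsub)]
  simp only [Option.getD_some]
  rw [List.getLast_eq_getElem]
  have hidx : ((s.drop st).take b).length - 1 < b := by omega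
  simp only [List.getElem_take, List.getElem_drop, hlen]
  congr 1
  omega

-- pvBS steps by one whole group at an aligned position
theorem pvBS_group (s : List Int) (M : Nat) (p : Nat) (hM : 1 ≤ M)
    (hdvd : M ∣ p) (hle : p + M ≤ s.length) :
    pvBS s M p = s[p + M - 1]'(by omega) * M + pvBS s M (p + M) := by
  obtain ⟨u, hu⟩ := hdvd
  have hskip : pvBS s M p = pvBS s M (p + (M - 1)) := by
    apply pvBS_skip
    intro t ht
    have : (p + t + 1) % M = (t + 1) % M := by
      conv_lhs => rw [hu, Nat.add_assoc, Nat.mul_add_mod]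
    rw [this, Nat.mod_eq_of_lt (by omega)]
    omega
  rw [hskip, pvBS, dif_pos (by omega)]
  have hmod : (p + (M - 1) + 1) % M = 0 := by
    have : p + (M - 1) + 1 = M * (u + 1) := by rw [hu]; ring_nf; omega
    rw [this, Nat.mul_mod_right]
  rw [if_pos hmod]
  congr 2
  · congr 1; omega
  · omega

-- A's loop equals pvBS
theorem pvALoop_eq_pvBS (s : List Int) (m : Int) (hm : 1 ≤ m)
    (hs : s.Pairwise (fun a b => b ≤ a)) :
    ∀ c : Nat, c ≤ s.length → m.toNat ∣ (s.length - c) → ∀ r : Int,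
      pvALoop s m (c : Int) r = r + pvBS s m.toNat (s.length - c) := by
  intro c
  induction c using Nat.strong_induction_on with
  | _ c ih =>
    intro hc hdvd r
    set M := m.toNat with hMdef
    have hm' : m = (M : Int) := by omega
    by_cases hcm : m ≤ (c : Int)
    · have hMc : M ≤ c := by omega
      have hst : s.length - c + M ≤ s.length := by omega
      rw [pvALoop, dif_pos ⟨hcm, hm⟩]
      have hfun : (fun i => (PySem.List.pyGet? s ((s.length : Int) - (c : Int) + i)).getD 0)
          = (fun i => (PySem.List.pyGet? s (((s.length - c : Nat) : Int) + i)).getD 0) := by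
        funext i; congr 2; omega
      have hA : (PySem.List.pyRange 0 m 1).map
            (fun i => (PySem.List.pyGet? s ((s.length : Int) - (c : Int) + i)).getD 0)
          = (s.drop (s.length - c)).take M := by
        rw [hfun, hm']
        exact pv_answer_eq s (s.length - c) M hst
      simp only [hA]
      rw [pv_group_min s hs (s.length - c) M (by omega) hst]
      have hrec : (c : Int) - m = ((c - M : Nat) : Int) := by omega
      have hdvd' : M ∣ (s.length - (c - M)) := by
        obtain ⟨u, hu⟩ := hdvd
        refine ⟨u + 1, ?_⟩
        have hmu : M * (u + 1) = M * u + M := by ring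
        omega
      rw [hrec, ih (c - M) (by omega) (by omega) hdvd']
      rw [show s.length - (c - M) = s.length - c + M from by omega]
      rw [pvBS_group s M (s.length - c) (by omega) hdvd hst]
      have hmm : ∀ x : Int, x * m = x * (M : Int) := fun x => by rw [hm']
      rw [hmm]
      ring
    · rw [pvALoop, dif_neg (by omega)]
      have hskip : pvBS s M (s.length - c) = pvBS s M (s.length - c + c) := by
        apply pvBS_skip
        intro t ht
        obtain ⟨u, hu⟩ := hdvd
        have : (s.length - c + t + 1) % M = (t + 1) % M := by
          conv_lhs => rw [hu, Nat.add_assoc, Nat.mul_add_mod]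
        rw [this, Nat.mod_eq_of_lt (by omega)]
        omega
      rw [hskip, pvBS_stop s M _ (by omega)]
      ring

-- ---- B side ----
-- pvBS over a constant run [p, p+c) of value v
theorem pvBS_run (s : List Int) (M : Nat) (hM : 1 ≤ M) (v : Int) :
    ∀ c p, p + c ≤ s.length → (∀ j (hj : j < s.length), p ≤ j → j < p + c → s[j] = v) →
      pvBS s M p = v * M * (((p + c) / M - p / M : Nat) : Int) + pvBS s M (p + c) := by
  intro c
  induction c with
  | zero => intro p _ _; simp
  | succ c ih =>
    intro p hle hrun
    have hp : p < s.length := by omega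
    rw [pvBS, dif_pos hp]
    have hsp : s[p] = v := hrun p hp (le_refl p) (by omega)
    have ihp : pvBS s M (p + 1)
        = v * M * (((p + (c + 1)) / M - (p + 1) / M : Nat) : Int) + pvBS s M (p + (c + 1)) := by
      have h := ih (p + 1) (by omega) (fun j hj h1 h2 => hrun j hj (by omega) (by omega))
      rw [show p + 1 + c = p + (c + 1) from by omega] at h
      exact h
    rw [ihp]
    have hsucc : (p + 1) / M = p / M + if M ∣ p + 1 then 1 else 0 := Nat.succ_div
    have hmono2 : (p + 1) / M ≤ (p + (c + 1)) / M := Nat.div_le_div_right (by omega)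
    by_cases hdvd : M ∣ p + 1
    · rw [if_pos (by rwa [Nat.dvd_iff_mod_eq_zero] at hdvd), hsp]
      have h2 : ((p + (c + 1)) / M - p / M : Nat)
          = ((p + (c + 1)) / M - (p + 1) / M : Nat) + 1 := by
        rw [hsucc, if_pos hdvd] at hmono2 ⊢
        omega
      rw [h2]
      push_cast
      ring
    · rw [if_neg (by rwa [Nat.dvd_iff_mod_eq_zero] at hdvd), zero_add]
      have h2 : (p + 1) / M = p / M := by rw [hsucc, if_neg hdvd]; omega
      rw [h2]
      

-- count of a value in a flatMap of replicates over a Nodup list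
theorem pv_count_flatMap (f : Int → Nat) (a : Int) :
    ∀ ks : List Int, ks.Nodup →
      (ks.flatMap (fun v => List.replicate (f v) v)).count a = if a ∈ ks then f a else 0 := by
  intro ks
  induction ks with
  | nil => simp
  | cons v ks ih =>
    intro hnd
    rcases List.nodup_cons.mp hnd with ⟨hv, hnd'⟩
    rw [List.flatMap_cons, List.count_append, List.count_replicate, ih hnd']
    by_cases hav : a = v
    · subst hav
      simp [hv]
    · simp [hav, Ne.symm hav]

-- flatMap of replicates over a strictly descending list is descending
theorem pv_flatMap_pairwise (f : Int → Nat) :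
    ∀ ks : List Int, ks.Pairwise (fun a b => b < a) →
      (ks.flatMap (fun v => List.replicate (f v) v)).Pairwise (fun a b => b ≤ a) := by
  intro ks
  induction ks with
  | nil => simp
  | cons v ks ih =>
    intro hp
    rcases List.pairwise_cons.mp hp with ⟨hv, hp'⟩
    rw [List.flatMap_cons, List.pairwise_append]
    refine ⟨List.pairwise_replicate.mpr (by simp), ih hp', ?_⟩
    intro a ha b hb
    have hav : a = v := List.eq_of_mem_replicate ha
    obtain ⟨u, hu, hbu⟩ := List.mem_flatMap.mp hb
    have hbv : b = u := List.eq_of_mem_replicate hbu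
    subst hav
    rw [hbv]
    exact le_of_lt (hv u hu)

-- the sorted list is the concatenation of the runs given by the descending distinct values
theorem pv_sorted_eq_flatMap (score : List Int) :
    PySem.List.sorted score (fun x => x) true
      = (PySem.List.sorted (PySem.Dict.keys (PySem.Dict.counter score)) (fun x => x) true).flatMap
          (fun v => List.replicate (score.count v) v) := by
  set ks := PySem.List.sorted (PySem.Dict.keys (PySem.Dict.counter score)) (fun x => x) true with hks
  have hknd : ks.Nodup := by
    apply (PySem.List.sorted_perm _ _ _).nodup_iff.mpr
    rw [PySem.Dict.keys_counter]
    exact PySem.Set.nodup_ofList score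
  have hkdesc : ks.Pairwise (fun a b => b ≤ a) := PySem.List.sorted_pairwise_rev _ _
  have hkstrict : ks.Pairwise (fun a b => b < a) := by
    have := List.Pairwise.and hkdesc hknd
    exact this.imp (fun {a b} h => lt_of_le_of_ne h.1 (Ne.symm h.2))
  have hmemks : ∀ a : Int, a ∈ ks ↔ a ∈ score := by
    intro a
    rw [hks, PySem.List.mem_sorted, PySem.Dict.keys_counter, PySem.Set.mem_ofList]
  have hperm : (PySem.List.sorted score (fun x => x) true).Perm
      (ks.flatMap (fun v => List.replicate (score.count v) v)) := by
    apply (PySem.List.sorted_perm _ _ _).trans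
    rw [List.perm_iff_count]
    intro a
    rw [pv_count_flatMap (fun v => score.count v) a ks hknd]
    by_cases ha : a ∈ score
    · rw [if_pos ((hmemks a).mpr ha)]
    · rw [if_neg (fun h => ha ((hmemks a).mp h)), List.count_eq_zero_of_not_mem ha]
  exact PySem.List.eq_of_perm_of_pairwise_le_of_injective (fun x : Int => -x) neg_injective
    hperm
    (by simpa using (PySem.List.sorted_pairwise_rev score (fun x => x)))
    (by simpa using pv_flatMap_pairwise (fun v => score.count v) ks hkstrict)

-- per-run arithmetic: B's capped-boundary count equals the uncapped count inside the list
theorem pv_run_arith (M c p n : Nat) (hM : 1 ≤ M) (hle : p + c ≤ n) (v : Int) :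
    (if (p : Int) < min ((p : Int) + (c : Nat)) ((((n / M : Nat)) : Int) * M) then
        v * (PySem.Int.floordiv (min ((p : Int) + (c : Nat)) ((((n / M : Nat)) : Int) * M)) (M : Int)
              - PySem.Int.floordiv (p : Int) (M : Int)) * (M : Int)
      else 0)
      = v * M * (((p + c) / M - p / M : Nat) : Int) := by
  set q := n / M with hq
  have hn : n < (q + 1) * M := by
    have h1 := Nat.div_add_mod n M
    have h2 : n % M < M := Nat.mod_lt n (by omega)
    have h3 : (q + 1) * M = M * q + M := by ring
    have h4 : M * (n / M) = M * q := by rw [hq]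
    omega
  have hqM : q * M ≤ n := Nat.div_mul_le_self n M
  have hcast : (((q : Nat) : Int) * (M : Int)) = (((q * M : Nat)) : Int) := by push_cast; ring
  by_cases hb : p + c ≤ q * M
  · have hmin : min ((p : Int) + (c : Nat)) (((q : Nat) : Int) * M) = ((p + c : Nat) : Int) := by
      rw [hcast]
      have : ((p : Int) + (c : Nat)) = ((p + c : Nat) : Int) := by push_cast; ring
      rw [this]
      exact min_eq_left (by exact_mod_cast hb)
    rw [hmin]
    by_cases hc : 0 < c
    · rw [if_pos (by push_cast; omega)]
      rw [PySem.Int.floordiv_natCast, PySem.Int.floordiv_natCast]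
      have hd : p / M ≤ (p + c) / M := Nat.div_le_div_right (by omega)
      push_cast
      ring_nf
      rw [Int.ofNat_sub hd]
      push_cast
      ring
    · have hc0 : c = 0 := by omega
      subst hc0
      rw [if_neg (by push_cast; omega)]
      simp
  · -- run crosses the end of the full groups: p + c > q*M, and p + c ≤ n < (q+1)*M
    have hbM : (p + c) / M = q := Nat.div_eq_of_lt_le (by omega) (by omega)
    have hmin : min ((p : Int) + (c : Nat)) (((q : Nat) : Int) * M) = ((q * M : Nat) : Int) := by
      rw [hcast]
      have : ((p : Int) + (c : Nat)) = ((p + c : Nat) : Int) := by push_cast; ring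
      rw [this]
      exact min_eq_right (by exact_mod_cast (by omega : q * M ≤ p + c))
    rw [hmin]
    by_cases hp : p < q * M
    · rw [if_pos (by exact_mod_cast hp)]
      rw [PySem.Int.floordiv_natCast, PySem.Int.floordiv_natCast]
      have hqq : (q * M) / M = q := Nat.mul_div_cancel q (by omega)
      rw [hqq, hbM]
      have hd : p / M ≤ q := by rw [← hbM]; exact Nat.div_le_div_right (by omega)
      rw [Int.ofNat_sub hd]
      push_cast
      ring
    · rw [if_neg (by exact_mod_cast hp)]
      have hpM : p / M = q := Nat.div_eq_of_lt_le (by omega) (by omega)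
      rw [hbM, hpM]
      simp
  
-- B's fold over the runs equals pvBS
theorem pvBFold_eq_pvBS (score : List Int) (m : Int) (hm : 1 ≤ m) :
    ∀ (ks : List Int) (p : Nat) (r : Int),
      p ≤ (PySem.List.sorted score (fun x => x) true).length →
      (PySem.List.sorted score (fun x => x) true).drop p
        = ks.flatMap (fun v => List.replicate (score.count v) v) →
      (ks.foldl
        (fun (st : Int × Int) v =>
          (if st.2 < min (st.2 + (PySem.Dict.counter score).getD v 0)
                (PySem.Int.floordiv ((score.length : Nat) : Int) m * m) then
              st.1 + v * (PySem.Int.floordiv (min (st.2 + (PySem.Dict.counter score).getD v 0)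
                    (PySem.Int.floordiv ((score.length : Nat) : Int) m * m)) m
                  - PySem.Int.floordiv st.2 m) * m
            else st.1,
            st.2 + (PySem.Dict.counter score).getD v 0)) (r, (p : Nat))).1
        = r + pvBS (PySem.List.sorted score (fun x => x) true) m.toNat p := by
  set s := PySem.List.sorted score (fun x => x) true with hs
  have hlen : s.length = score.length := (PySem.List.sorted_perm _ _ _).length_eq
  set M := m.toNat with hM
  have hm' : m = (M : Int) := by omega
  intro ks
  induction ks with
  | nil =>
    intro p r hp hdrop
    simp only [List.foldl_nil]
    have : s.length ≤ p := by
      by_contra hcon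
      have := congrArg List.length hdrop
      simp at this
      omega
    rw [pvBS_stop _ _ _ this]
    ring
  | cons v ks ih =>
    intro p r hp hdrop
    rw [List.flatMap_cons] at hdrop
    set c := score.count v with hc
    have hdlen : (s.drop p).length = s.length - p := by simp
    have hclen : c + (ks.flatMap (fun v => List.replicate (score.count v) v)).length
        = s.length - p := by
      have := congrArg List.length hdrop
      simpa using this.symm
    have hpc : p + c ≤ s.length := by omega
    have hrun : ∀ j (hj : j < s.length), p ≤ j → j < p + c → s[j] = v := by
      intro j hj h1 h2
      have hq : (s.drop p)[j - p]? = s[j]? := by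
        rw [List.getElem?_drop]
        congr 1
        omega
      rw [hdrop] at hq
      rw [List.getElem?_append_left (by simpa using (by omega : j - p < c)),
        List.getElem?_replicate, if_pos (by omega)] at hq
      rw [List.getElem?_eq_getElem hj] at hq
      exact (Option.some.inj hq).symm
    have hdrop' : s.drop (p + c) = ks.flatMap (fun v => List.replicate (score.count v) v) := by
      have : s.drop (p + c) = (s.drop p).drop c := by rw [List.drop_drop]
      rw [this, hdrop, List.drop_append_of_le_length (by simp), List.drop_replicate,
        Nat.sub_self, List.replicate_zero, List.nil_append]
    rw [List.foldl_cons]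
    simp only
    rw [PySem.Dict.getD_counter]
    have hcnat : ((p : Nat) : Int) + ((c : Nat) : Int) = ((p + c : Nat) : Int) := by push_cast; ring
    have harith := pv_run_arith M c p score.length (by omega) (by omega) v
    rw [pvBS_run s M (by omega) v c p hpc hrun]
    -- rewrite the fold state: second component becomes p + c
    have hstep : (if ((p : Nat) : Int) < min (((p + c : Nat) : Int)) (PySem.Int.floordiv ((score.length : Nat) : Int) m * m) then
          r + v * (PySem.Int.floordiv (min (((p + c : Nat) : Int)) (PySem.Int.floordiv ((score.length : Nat) : Int) m * m)) m
              - PySem.Int.floordiv ((p : Nat) : Int) m) * m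
        else r)
        = r + v * M * (((p + c) / M - p / M : Nat) : Int) := by
      rw [hm', PySem.Int.floordiv_natCast,
        show (((p + c : Nat)) : Int) = ((p : Int) + (c : Nat)) from by push_cast; ring,
        ← harith]
      split_ifs with h1 <;> ring
    have := ih (p + c) (r + v * M * (((p + c) / M - p / M : Nat) : Int)) (by omega) hdrop'
    rw [hcnat, hstep, this]
    ring

-- ===== VERDICT (by name: the statement is the Claim_ definition above) =====
theorem solution_spec : Claim_equal_solution := by
  intro k m score _ hpre
  have hm1 : 1 ≤ m := hpre
  show solution k m score = solution_alt k m score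
  unfold solution solution_alt
  simp only
  rw [PySem.Dict.foldl_insert_getD_add_one_eq_counter]
  set s := PySem.List.sorted score (fun x => x) true with hs
  have hlen : s.length = score.length := (PySem.List.sorted_perm _ _ _).length_eq
  set M := m.toNat with hM
  have hm' : m = (M : Int) := by omega
  have hsorted : s.Pairwise (fun a b => b ≤ a) := PySem.List.sorted_pairwise_rev score (fun x => x)
  have hdrop0 : s.drop 0 = (PySem.List.sorted (PySem.Dict.keys (PySem.Dict.counter score)) (fun x => x) true).flatMap
      (fun v => List.replicate (score.count v) v) := by
    rw [List.drop_zero, hs]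
    exact pv_sorted_eq_flatMap score
  have hB := pvBFold_eq_pvBS score m hm1
      (PySem.List.sorted (PySem.Dict.keys (PySem.Dict.counter score)) (fun x => x) true)
      0 0 (by omega) hdrop0
  simp only [Nat.cast_zero] at hB
  rw [hB, zero_add]
  by_cases hlt : (s.length : Int) < m
  · rw [if_pos hlt]
    rw [pvBS_skip s M s.length 0 (fun t ht => by
      rw [Nat.mod_eq_of_lt (by omega)]; omega)]
    exact (pvBS_stop s M _ (by omega)).symm
  · rw [if_neg hlt]
    have := pvALoop_eq_pvBS s m hm1 hsorted s.length le_rfl (by simp) 0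
    rw [this, zero_add]
    congr 1
    omega
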